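-- pv_equiv track=rewrite | github.com/JQ-Hee/TFSeg | main.py | _shape_arrangement
-- ===== SOURCE A (Python) =====
-- def _shape_arrangement(images, arrange_mode):
--     arranged = [None] * len(images)
--     left, right = 0, len(images) - 1
--
--     for i, img in enumerate(images):
--         pos = left if i % 2 == 0 else right
--         arranged[pos] = img
--         left += (i % 2 == 0)
--         right -= (i % 2 != 0)
--
--     return arranged
-- ===== SOURCE B (Python) =====
-- def _shape_arrangement(images, arrange_mode):
--     imgs = list(images)
--     return imgs[0::2] + imgs[1::2][::-1]
-- ===== Notes on version B (the rewrite author's own statement) =====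
-- stated objective: idiomatic
-- what changed: Replaces A's preallocated result array filled through left/right pointer bookkeeping with a loop-free split-and-concatenate: the even-indexed slice followed by the reversed odd-indexed slice.
import Mathlib
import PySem

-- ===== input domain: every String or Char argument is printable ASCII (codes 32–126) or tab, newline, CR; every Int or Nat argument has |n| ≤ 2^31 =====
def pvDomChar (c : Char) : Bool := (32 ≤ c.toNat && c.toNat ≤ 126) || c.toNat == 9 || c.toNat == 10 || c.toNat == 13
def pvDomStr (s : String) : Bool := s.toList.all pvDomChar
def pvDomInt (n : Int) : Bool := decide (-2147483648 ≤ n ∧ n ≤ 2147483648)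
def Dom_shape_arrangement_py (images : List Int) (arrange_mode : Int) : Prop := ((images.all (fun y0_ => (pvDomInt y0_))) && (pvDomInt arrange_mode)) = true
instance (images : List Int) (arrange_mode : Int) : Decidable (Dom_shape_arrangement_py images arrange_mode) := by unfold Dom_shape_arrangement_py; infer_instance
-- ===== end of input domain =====

-- B replaces A's preallocated-array / two-pointer fill with loop-free slicing
-- (evens ++ reversed odds); objective: simpler/idiomatic, same O(n) cost.

-- ===== PORT A =====
-- the loop 'for i, img in enumerate(images)' with state (arranged, left, right);
-- arranged[pos] = img : pos is always a valid index here (a literal Python run never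
-- raises), and 0 ≤ pos, so Int.toNat is exact at every call.
def pvALoop (xs : List Int) (i : Nat) (arranged : List Int) (left right : Int) : List Int :=
  match xs with
  | [] => arranged
  | img :: rest =>
      let pos : Int := if i % 2 == 0 then left else right
      pvALoop rest (i + 1) (arranged.set pos.toNat img)
        (left + (if i % 2 == 0 then 1 else 0))
        (right - (if i % 2 == 0 then 0 else 1))

-- '[None] * len(images)': the None placeholder is modelled by 0 — exact for the return
-- value, since the loop overwrites every slot before returning (that is what the claim proves).
def shape_arrangement_py (images : List Int) (arrange_mode : Int) : List Int :=
  pvALoop images 0 (List.replicate images.length 0) 0 ((images.length : Int) - 1)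

-- ===== PORT B =====
-- hand port of the step-2 slice xs[0::2] (every second element); xs[1::2] = pvStride2 (xs.drop 1);
-- [::-1] is List.reverse (PySem.List.slice?_none_none_neg_one). Exact on all lists.
def pvStride2 : List Int → List Int
  | [] => []
  | [x] => [x]
  | x :: _ :: xs => x :: pvStride2 xs

def shape_arrangement_py_alt (images : List Int) (arrange_mode : Int) : List Int :=
  pvStride2 images ++ (pvStride2 (images.drop 1)).reverse

-- ===== PRECONDITION & SPEC =====
def Spec_shape_arrangement_py (images : List Int) (arrange_mode : Int) (out : List Int) : Prop := out = shape_arrangement_py_alt images arrange_mode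
instance (images : List Int) (arrange_mode : Int) (out : List Int) : Decidable (Spec_shape_arrangement_py images arrange_mode out) := by unfold Spec_shape_arrangement_py; infer_instance

-- ===== CLAIM (what is proved, stated in full; the proofs are below) =====
def Claim_equal_shape_arrangement_py : Prop := ∀ (images : List Int) (arrange_mode : Int), Dom_shape_arrangement_py images arrange_mode → Spec_shape_arrangement_py images arrange_mode (shape_arrangement_py images arrange_mode)

-- ===== LEMMAS AND PROOFS =====

-- the loop invariant: starting from an even step counter 2*k, with left = l and
-- right = l + |xs| - 1 inside a buffer that is long enough, the loop fills exactly
-- the window [l, l+|xs|) with evens ++ reversed odds of xs.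
theorem pvALoop_spec (xs : List Int) :
    ∀ (k : Nat) (arranged : List Int) (l : Nat),
      l + xs.length ≤ arranged.length →
      pvALoop xs (2 * k) arranged (l : Int) ((l : Int) + xs.length - 1)
        = arranged.take l ++ pvStride2 xs ++ (pvStride2 (xs.drop 1)).reverse
            ++ arranged.drop (l + xs.length) := by
  induction xs using pvStride2.induct with
  | case1 =>
      intro k arranged l h
      simp [pvALoop, pvStride2, List.take_append_drop]
  | case2 x =>
      intro k arranged l h
      have hmod : ((2 * k) % 2 == 0) = true := by simp [Nat.mul_mod_right]
      have hl : l < arranged.length := by simpa using h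
      simp only [pvALoop, hmod, if_true]
      rw [Int.toNat_natCast, List.set_eq_take_append_cons_drop, if_pos hl]
      simp [pvStride2]
  | case3 x0 x1 xs ih =>
      intro k arranged l h
      have hlen : l + (xs.length + 2) ≤ arranged.length := by
        simpa [Nat.add_assoc] using h
      have hmod0 : ((2 * k) % 2 == 0) = true := by simp [Nat.mul_mod_right]
      have hmod1 : ((2 * k + 1) % 2 == 0) = false := by
        have : (2 * k + 1) % 2 = 1 := by omega
        simp [this]
      simp only [pvALoop, hmod0, hmod1, if_true, Bool.false_eq_true, if_false, sub_zero, add_zero]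
      -- the two writes of this double step
      have hpos1 : ((l : Int) + ((x0 :: x1 :: xs).length : Nat) - 1).toNat
          = l + xs.length + 1 := by
        simp only [List.length_cons]
        omega
      rw [Int.toNat_natCast, hpos1]
      -- fold the next call into the IH (step counter 2*(k+1), window [l+1, r-1])
      have harith : ((l : Int) + ((x0 :: x1 :: xs).length : Nat) - 1) - 1
          = ((l + 1 : Nat) : Int) + (xs.length : Nat) - 1 := by
        simp only [List.length_cons]
        push_cast
        ring
      have hih := ih (k + 1) ((arranged.set l x0).set (l + xs.length + 1) x1) (l + 1)
        (by simp only [List.length_set, List.length_take, List.length_drop]; omega)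
      have hstep : 2 * k + 1 + 1 = 2 * (k + 1) := by ring
      rw [show ((l : Int) + 1) = ((l + 1 : Nat) : Int) by push_cast; ring, harith, hstep, hih]
      -- now pure list algebra on take/drop/set
      have htake : ((arranged.set l x0).set (l + xs.length + 1) x1).take (l + 1)
          = arranged.take l ++ [x0] := by
        rw [List.take_set, List.set_eq_of_length_le
            (by simp only [List.length_set, List.length_take, List.length_drop]; omega)]
        rw [List.take_set]
        rw [List.set_eq_take_append_cons_drop, if_pos (by simp only [List.length_set, List.length_take, List.length_drop]; omega)]
        simp [List.take_take, List.drop_take]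
      have hdrop : ((arranged.set l x0).set (l + xs.length + 1) x1).drop (l + 1 + xs.length)
          = x1 :: arranged.drop (l + (xs.length + 2)) := by
        rw [List.drop_set, if_neg (by omega), List.drop_set, if_pos (by omega)]
        have : l + xs.length + 1 - (l + 1 + xs.length) = 0 := by omega
        rw [this, List.set_eq_take_append_cons_drop,
          if_pos (by simp only [List.length_set, List.length_take, List.length_drop]; omega)]
        simp [List.drop_drop]
        omega
      rw [htake, hdrop]
      simp [pvStride2, List.length_cons]
      have hodds : pvStride2 (x1 :: xs) = x1 :: pvStride2 (xs.drop 1) := by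
        cases xs with
        | nil => simp [pvStride2]
        | cons a m => simp [pvStride2]
      rw [hodds]
      simp [List.append_assoc]

-- ===== VERDICT (by name: the statement is the Claim_ definition above) =====
theorem shape_arrangement_py_spec : Claim_equal_shape_arrangement_py := by
  intro images arrange_mode _
  unfold Spec_shape_arrangement_py shape_arrangement_py shape_arrangement_py_alt
  have h := pvALoop_spec images 0 (List.replicate images.length 0) 0 (by simp)
  simpa using h
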